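-- pv_equiv track=rewrite | github.com/victorjgomez/python_competitive_programming_problems | problems/1_problem#B1213_v2.py | solution
-- ===== SOURCE A (Python) =====
-- from typing import List
--
-- def solution(prices: List[int], n: int):
--     number_day_bad_prices = 0
--     min = prices[n - 1]
--
--     for i in range(n - 2, -1, -1):
--         if prices[i] > min:
--             number_day_bad_prices += 1
--         elif prices[i] < min:
--             min = prices[i]
--
--     return number_day_bad_prices
-- ===== SOURCE B (Python) =====
-- def solution(prices, n):
--     if n < 2:
--         return 0
--     suffmin = [prices[n - 1]] * n
--     for i in range(n - 2, -1, -1):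
--         suffmin[i] = min(prices[i], suffmin[i + 1])
--     return sum(prices[i] > suffmin[i + 1] for i in range(n - 1))
-- ===== Notes on version B (the rewrite author's own statement) =====
-- stated objective: alternative
-- what changed: B replaces A's single backward sweep carrying a running minimum and a counter with two separate passes: it first materializes a suffix-minimum table, then counts in a forward pass the indices whose price exceeds the suffix minimum to their right.
import Mathlib
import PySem

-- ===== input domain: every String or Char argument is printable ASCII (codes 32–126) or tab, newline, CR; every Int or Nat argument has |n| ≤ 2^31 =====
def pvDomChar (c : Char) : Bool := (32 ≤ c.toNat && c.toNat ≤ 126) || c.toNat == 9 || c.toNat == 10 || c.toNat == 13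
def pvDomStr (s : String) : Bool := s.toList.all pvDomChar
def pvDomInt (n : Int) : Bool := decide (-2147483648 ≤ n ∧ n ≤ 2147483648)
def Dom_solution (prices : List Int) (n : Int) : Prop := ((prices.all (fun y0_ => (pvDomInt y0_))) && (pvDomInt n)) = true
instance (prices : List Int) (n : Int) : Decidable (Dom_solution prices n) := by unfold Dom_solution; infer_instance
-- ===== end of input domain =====

-- B replaces A's fused backward sweep (running minimum + counter) by two separate passes:
-- build a suffix-minimum table, then count forward; same cost, different decomposition.

-- ===== PORT A =====
def solution (prices : List Int) (n : Int) : Int :=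
  let m0 := PySem.List.pyGetD prices (n - 1) 0
  ((PySem.List.pyRange (n - 2) (-1) (-1)).foldl
    (fun (st : Int × Int) i =>
      let p := PySem.List.pyGetD prices i 0
      if p > st.2 then (st.1 + 1, st.2)
      else if p < st.2 then (st.1, p)
      else st)
    ((0 : Int), m0)).1

-- ===== PORT B =====
def solution_alt (prices : List Int) (n : Int) : Int :=
  if n < 2 then 0
  else
    let suffmin0 := List.replicate n.toNat (PySem.List.pyGetD prices (n - 1) 0)
    let suffmin := (PySem.List.pyRange (n - 2) (-1) (-1)).foldl
      (fun sm i =>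
        sm.set i.toNat (min (PySem.List.pyGetD prices i 0) (PySem.List.pyGetD sm (i + 1) 0)))
      suffmin0
    (PySem.List.pyRange 0 (n - 1) 1).foldl
      (fun c i =>
        c + (if PySem.List.pyGetD prices i 0 > PySem.List.pyGetD suffmin (i + 1) 0 then 1 else 0))
      0

-- ===== PRECONDITION & SPEC =====
-- Pre_ excludes exactly the inputs on which A raises IndexError: prices[n-1] (Python
-- indexing, so n-1 may wrap once) or some prices[i], i ∈ range(n-2,-1,-1), out of range.
def Pre_solution (prices : List Int) (n : Int) : Prop :=
  0 < prices.length ∧ 1 - (prices.length : Int) ≤ n ∧ n ≤ (prices.length : Int)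
instance (prices : List Int) (n : Int) : Decidable (Pre_solution prices n) := by
  unfold Pre_solution; infer_instance
def pvWitness_solution : List Int × Int := ([3, 1, 2], 3)

def Spec_solution (prices : List Int) (n : Int) (out : Int) : Prop := out = solution_alt prices n
instance (prices : List Int) (n : Int) (out : Int) : Decidable (Spec_solution prices n out) := by
  unfold Spec_solution; infer_instance

-- ===== CLAIM (what is proved, stated in full; the proofs are below) =====
def Claim_equal_solution : Prop := ∀ (prices : List Int) (n : Int), Dom_solution prices n → Pre_solution prices n → Spec_solution prices n (solution prices n)

-- ===== LEMMAS AND PROOFS =====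

-- min of prices[j..N-1] (meaningful for j < N ≤ prices.length)
def smin (L : List Int) (N j : Nat) : Int :=
  if _h : j + 1 < N then min (L.getD j 0) (smin L N (j + 1)) else L.getD j 0
termination_by N - j

-- the common value: #{ i < j : L[i] > min L[i+1..N-1] }
def cntSum (L : List Int) (N j : Nat) : Int :=
  ((List.range j).map (fun i => if L.getD i 0 > smin L N (i + 1) then (1 : Int) else 0)).sum

lemma smin_last (L : List Int) (N : Nat) : smin L N (N - 1) = L.getD (N - 1) 0 := by
  rw [smin, dif_neg (by omega)]

lemma smin_step (L : List Int) (N j : Nat) (h : j + 1 < N) :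
    smin L N j = min (L.getD j 0) (smin L N (j + 1)) := by
  rw [smin]; simp [h]

-- A's loop invariant: starting from (c, smin L N j) and running down from j-1,
-- the counter ends at c + cntSum L N j.
lemma A_loop (L : List Int) (N : Nat) : ∀ (j : Nat) (c : Int), j < N →
    ((PySem.List.pyRange ((j : Int) - 1) (-1) (-1)).foldl
      (fun (st : Int × Int) i =>
        let p := PySem.List.pyGetD L i 0
        if p > st.2 then (st.1 + 1, st.2)
        else if p < st.2 then (st.1, p)
        else st)
      (c, smin L N j)).1 = c + cntSum L N j := by
  intro j
  induction j with
  | zero =>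
      intro c _
      rw [PySem.List.pyRange_neg_one_eq_nil (by omega)]
      simp [cntSum]
  | succ j ih =>
      intro c hj
      rw [show ((j + 1 : Nat) : Int) - 1 = (j : Int) by push_cast; ring,
          PySem.List.pyRange_neg_one_cons (by omega : (-1 : Int) < (j : Int))]
      simp only [List.foldl_cons]
      have hstep :
          (let p := PySem.List.pyGetD L (j : Int) 0
            if p > (c, smin L N (j + 1)).2 then ((c, smin L N (j + 1)).1 + 1, (c, smin L N (j + 1)).2)
            else if p < (c, smin L N (j + 1)).2 then ((c, smin L N (j + 1)).1, p)
            else (c, smin L N (j + 1)))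
          = ((c + if L.getD j 0 > smin L N (j + 1) then (1 : Int) else 0), smin L N j) := by
        simp only [PySem.List.pyGetD_natCast]
        rw [smin_step L N j hj]
        split_ifs with h1 h2
        · rw [min_eq_right (le_of_lt h1)]
        · rw [min_eq_left (le_of_lt h2)]; simp
        · have hpm : L.getD j 0 = smin L N (j + 1) := by omega
          rw [hpm, min_self]; simp
      rw [hstep, ih _ (by omega)]
      have : cntSum L N (j + 1) = cntSum L N j
          + (if L.getD j 0 > smin L N (j + 1) then (1 : Int) else 0) := by
        simp [cntSum, List.range_succ]
      rw [this]; ring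

-- B's table invariant: if positions j..N-1 of sm already hold the suffix minima,
-- running the assignment loop down from j-1 makes all positions 0..N-1 hold them.
lemma B_table (L : List Int) (N : Nat) : ∀ (j : Nat) (sm : List Int), j < N → sm.length = N →
    (∀ k, j ≤ k → k < N → sm.getD k 0 = smin L N k) →
    (((PySem.List.pyRange ((j : Int) - 1) (-1) (-1)).foldl
        (fun sm i =>
          sm.set i.toNat (min (PySem.List.pyGetD L i 0) (PySem.List.pyGetD sm (i + 1) 0)))
        sm).length = N ∧
      ∀ k, k < N →
        ((PySem.List.pyRange ((j : Int) - 1) (-1) (-1)).foldl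
          (fun sm i =>
            sm.set i.toNat (min (PySem.List.pyGetD L i 0) (PySem.List.pyGetD sm (i + 1) 0)))
          sm).getD k 0 = smin L N k) := by
  intro j
  induction j with
  | zero =>
      intro sm _ hlen hinv
      rw [PySem.List.pyRange_neg_one_eq_nil (by omega)]
      exact ⟨hlen, fun k hk => hinv k (Nat.zero_le k) hk⟩
  | succ j ih =>
      intro sm hj hlen hinv
      rw [show ((j + 1 : Nat) : Int) - 1 = (j : Int) by push_cast; ring,
          PySem.List.pyRange_neg_one_cons (by omega : (-1 : Int) < (j : Int))]
      simp only [List.foldl_cons]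
      have hcast : ((j : Int) + 1) = ((j + 1 : Nat) : Int) := by push_cast; ring
      have hget : PySem.List.pyGetD sm ((j : Int) + 1) 0 = smin L N (j + 1) := by
        rw [hcast, PySem.List.pyGetD_natCast]
        exact hinv (j + 1) le_rfl hj
      have htoNat : ((j : Int)).toNat = j := by omega
      set sm' := sm.set ((j : Int)).toNat
          (min (PySem.List.pyGetD L (j : Int) 0) (PySem.List.pyGetD sm ((j : Int) + 1) 0)) with hsm'
      have hlen' : sm'.length = N := by simp [hsm', hlen]
      have hinv' : ∀ k, j ≤ k → k < N → sm'.getD k 0 = smin L N k := by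
        intro k hk1 hk2
        rcases eq_or_lt_of_le hk1 with rfl | hk
        · rw [hsm', htoNat, PySem.List.pyGetD_natCast, hget,
              List.getD_eq_getElem?_getD, List.getElem?_set_self (by omega)]
          simp only [Option.getD_some]
          rw [← smin_step L N j hj]
        · rw [hsm', htoNat, List.getD_eq_getElem?_getD,
              List.getElem?_set_ne (by omega)]
          rw [← List.getD_eq_getElem?_getD]
          exact hinv k (by omega) hk2
      exact ih sm' (by omega) hlen' hinv'

-- B's counting pass, rewritten through the table facts, equals cntSum.
lemma B_count (L : List Int) (N : Nat) (T : List Int)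
    (hT : ∀ k, k < N → T.getD k 0 = smin L N k) (hN : 1 ≤ N) :
    (PySem.List.pyRange 0 ((N : Int) - 1) 1).foldl
      (fun c i =>
        c + (if PySem.List.pyGetD L i 0 > PySem.List.pyGetD T (i + 1) 0 then (1 : Int) else 0))
      0 = cntSum L N (N - 1) := by
  rw [show ((N : Int) - 1) = ((N - 1 : Nat) : Int) by omega, PySem.List.pyRange_zero_nat,
      List.foldl_map, PySem.List.foldl_add]
  simp only [cntSum, zero_add]
  congr 1
  apply List.map_congr_left
  intro i hi
  have hilt : i < N - 1 := List.mem_range.mp hi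
  have hcast : ((i : Int) + 1) = ((i + 1 : Nat) : Int) := by push_cast; ring
  rw [hcast, PySem.List.pyGetD_natCast, PySem.List.pyGetD_natCast, hT (i + 1) (by omega)]

lemma solution_eq_alt (prices : List Int) (n : Int) (hpre : Pre_solution prices n) :
    solution prices n = solution_alt prices n := by
  obtain ⟨hlen, hlo, hhi⟩ := hpre
  by_cases hn : n < 2
  · -- loop in A is empty; B returns 0 directly
    unfold solution solution_alt
    rw [PySem.List.pyRange_neg_one_eq_nil (by omega)]
    simp [hn]
  · -- n ≥ 2: N := n.toNat, both sides equal cntSum prices N (N-1)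
    rw [not_lt] at hn
    set N := n.toNat with hN
    have hn2 : (2 : Nat) ≤ N := by omega
    have hNlen : N ≤ prices.length := by omega
    have hnN : n = (N : Int) := by omega
    have hA : solution prices n = cntSum prices N (N - 1) := by
      unfold solution
      have hinit : PySem.List.pyGetD prices (n - 1) 0 = smin prices N (N - 1) := by
        rw [smin_last, show n - 1 = ((N - 1 : Nat) : Int) by omega, PySem.List.pyGetD_natCast]
      rw [hinit, show n - 2 = ((N - 1 : Nat) : Int) - 1 by omega]
      exact (A_loop prices N (N - 1) 0 (by omega)).trans (by ring)
    have hB : solution_alt prices n = cntSum prices N (N - 1) := by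
      unfold solution_alt
      rw [if_neg (by omega)]
      have hinit : ∀ k, N - 1 ≤ k → k < N →
          (List.replicate n.toNat (PySem.List.pyGetD prices (n - 1) 0)).getD k 0
            = smin prices N k := by
        intro k hk1 hk2
        have hkeq : k = N - 1 := by omega
        subst hkeq
        rw [List.getD_eq_getElem?_getD, List.getElem?_replicate]
        rw [if_pos (by omega), smin_last,
            show n - 1 = ((N - 1 : Nat) : Int) by omega, PySem.List.pyGetD_natCast]
        simp
      have htab := B_table prices N (N - 1)
        (List.replicate n.toNat (PySem.List.pyGetD prices (n - 1) 0))
        (by omega) (by simp [hN]) hinit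
      rw [show ((N - 1 : Nat) : Int) - 1 = n - 2 from by omega] at htab
      have hc := B_count prices N _ htab.2 (by omega)
      rw [show ((N : Int) - 1) = n - 1 from by omega] at hc
      exact hc
    rw [hA, hB]

-- ===== VERDICT (by name: the statement is the Claim_ definition above) =====
theorem solution_spec : Claim_equal_solution := by
  intro prices n _ hpre
  unfold Spec_solution
  exact solution_eq_alt prices n hpre
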